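-- pv_equiv track=rewrite | github.com/minhmannh2001/neetcode-submissions | Data Structures & Algorithms/longest-repeating-substring-with-replacement/submission-2.py | can_make_uniform
-- ===== SOURCE A (Python) =====
-- def can_make_uniform(s: str, start: int, end: int, k: int) -> bool:
--     # Try every uppercase letter as target
--     for target in range(ord('A'), ord('Z') + 1):
--         count_diff = 0
--
--         for i in range(start, end + 1):
--             if s[i] != chr(target):
--                 count_diff += 1
--
--         if count_diff <= k:
--             return True
--
--     return False
-- ===== SOURCE B (Python) =====
-- def can_make_uniform(s: str, start: int, end: int, k: int) -> bool:
--     # One pass: gather the window, tally uppercase letters in a dict,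
--     # then compare window length minus the best tally with k.
--     window = [s[i] for i in range(start, end + 1)]
--     counts = {}
--     for c in window:
--         if 'A' <= c <= 'Z':
--             counts[c] = counts.get(c, 0) + 1
--     best = max(counts.values(), default=0)
--     return len(window) - best <= k
-- ===== Notes on version B (the rewrite author's own statement) =====
-- stated objective: alternative
-- what changed: A scans the window once per candidate uppercase letter (26 scans) keeping a mismatch count with an early return; B makes a single pass over the window building a frequency dict of its uppercase letters and compares window length minus the best tally with k.
import Mathlib
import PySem

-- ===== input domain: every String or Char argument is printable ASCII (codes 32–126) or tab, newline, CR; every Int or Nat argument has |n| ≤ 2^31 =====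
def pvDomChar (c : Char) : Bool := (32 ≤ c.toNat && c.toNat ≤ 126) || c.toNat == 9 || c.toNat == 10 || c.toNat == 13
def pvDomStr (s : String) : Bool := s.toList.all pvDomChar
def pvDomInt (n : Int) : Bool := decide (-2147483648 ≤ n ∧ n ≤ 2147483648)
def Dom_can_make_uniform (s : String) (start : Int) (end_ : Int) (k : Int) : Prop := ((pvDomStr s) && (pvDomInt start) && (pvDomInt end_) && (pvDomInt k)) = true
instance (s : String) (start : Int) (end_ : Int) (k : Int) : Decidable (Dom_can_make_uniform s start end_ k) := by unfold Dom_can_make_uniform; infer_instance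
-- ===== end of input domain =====

-- B replaces A's 26 per-letter window scans by one pass building an uppercase frequency dict (objective: alternative).


-- ===== PORT A =====
-- inner loop: for i in range(start, end+1): if s[i] != chr(target): count_diff += 1
-- (chr(target) for 65 ≤ target ≤ 90 is exactly Char.ofNat target.toNat; s[i] via pyGetD, exact under Pre_)
def canMakeUniformDiff (s : String) (start : Int) (end_ : Int) (t : Int) : Int :=
  (PySem.List.pyRange start (end_ + 1) 1).foldl
    (fun acc i => if PySem.List.pyGetD s.toList i ' ' != Char.ofNat t.toNat then acc + 1 else acc) 0

-- outer loop over range(ord('A'), ord('Z') + 1) with its early 'return True'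
def canMakeUniformGo (s : String) (start : Int) (end_ : Int) (k : Int) : List Int → Bool
  | [] => false
  | t :: ts =>
    if canMakeUniformDiff s start end_ t ≤ k then true
    else canMakeUniformGo s start end_ k ts

def can_make_uniform (s : String) (start : Int) (end_ : Int) (k : Int) : Bool :=
  canMakeUniformGo s start end_ k (PySem.List.pyRange 65 91 1)

-- ===== PORT B =====
-- 'A' <= c <= 'Z'
def pvIsUpper (c : Char) : Bool := decide ('A' ≤ c) && decide (c ≤ 'Z')

def can_make_uniform_alt (s : String) (start : Int) (end_ : Int) (k : Int) : Bool :=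
  -- window = [s[i] for i in range(start, end + 1)]
  let window := (PySem.List.pyRange start (end_ + 1) 1).map (fun i => PySem.List.pyGetD s.toList i ' ')
  -- counts[c] = counts.get(c, 0) + 1 for uppercase c
  let counts := window.foldl
    (fun d c => if pvIsUpper c then d.insert c (d.getD c 0 + 1) else d)
    (PySem.Dict.empty : PySem.Dict Char Int)
  -- best = max(counts.values(), default=0)
  let best := (PySem.List.max? counts.values (fun v => v)).getD 0
  decide ((window.length : Int) - best ≤ k)

-- ===== PRECONDITION & SPEC =====
-- A raises IndexError iff some i in range(start, end+1) has i < -len(s) or i >= len(s); Pre_ excludes exactly those inputs.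
def Pre_can_make_uniform (s : String) (start : Int) (end_ : Int) (k : Int) : Prop :=
  end_ < start ∨ (-(s.toList.length : Int) ≤ start ∧ end_ < (s.toList.length : Int))
instance (s : String) (start : Int) (end_ : Int) (k : Int) : Decidable (Pre_can_make_uniform s start end_ k) := by unfold Pre_can_make_uniform; infer_instance

def pvWitness_can_make_uniform : String × Int × Int × Int := ("ABAB", 0, 3, 1)

def Spec_can_make_uniform (s : String) (start : Int) (end_ : Int) (k : Int) (out : Bool) : Prop := out = can_make_uniform_alt s start end_ k
instance (s : String) (start : Int) (end_ : Int) (k : Int) (out : Bool) : Decidable (Spec_can_make_uniform s start end_ k out) := by unfold Spec_can_make_uniform; infer_instance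

-- ===== CLAIM (what is proved, stated in full; the proofs are below) =====
def Claim_equal_can_make_uniform : Prop := ∀ (s : String) (start : Int) (end_ : Int) (k : Int), Dom_can_make_uniform s start end_ k → Pre_can_make_uniform s start end_ k → Spec_can_make_uniform s start end_ k (can_make_uniform s start end_ k)

-- ===== LEMMAS AND PROOFS =====

-- the list of window characters both ports traverse
def pvWindow (s : String) (start : Int) (end_ : Int) : List Char :=
  (PySem.List.pyRange start (end_ + 1) 1).map (fun i => PySem.List.pyGetD s.toList i ' ')

-- the value B calls 'best', over an arbitrary character list
def pvBest (w : List Char) : Int :=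
  (PySem.List.max?
    ((PySem.Set.ofList (w.filter pvIsUpper)).map (fun c => ((w.filter pvIsUpper).count c : Int)))
    (fun v => v)).getD 0

theorem pvIsUpper_iff (c : Char) : pvIsUpper c = true ↔ 65 ≤ c.toNat ∧ c.toNat ≤ 90 := by
  have h1 : ('A'.val).toNat = 65 := rfl
  have h2 : ('Z'.val).toNat = 90 := rfl
  have h3 : (c.val).toNat = c.toNat := rfl
  simp only [pvIsUpper, Bool.and_eq_true, decide_eq_true_eq]
  rw [Char.le_def, Char.le_def, UInt32.le_iff_toNat_le, UInt32.le_iff_toNat_le, h1, h2, h3]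

theorem toNat_ofNat_upper (n : Nat) (h1 : 65 ≤ n) (h2 : n ≤ 90) : (Char.ofNat n).toNat = n := by
  have hv : n.isValidChar := Or.inl (by omega)
  simp [Char.ofNat, hv, Char.toNat_ofNatAux]

theorem countP_ne_eq (w : List Char) (a : Char) :
    (w.countP (fun c => c != a)) = w.length - w.count a := by
  rw [List.length_eq_countP_add_countP (p := fun c => c == a) (l := w)]
  have h2 : List.count a w = List.countP (fun c => c == a) w := by simp [List.count]
  have h3 : List.countP (fun c => c != a) w = List.countP (fun c => decide (¬((c == a) = true))) w := by
    apply List.countP_congr; intro x _; simp [bne]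
  omega

theorem diff_eq (s : String) (start end_ t : Int) :
    canMakeUniformDiff s start end_ t =
      ((pvWindow s start end_).length : Int) - ((pvWindow s start end_).count (Char.ofNat t.toNat) : Int) := by
  unfold canMakeUniformDiff
  rw [← List.foldl_map (f := fun i => PySem.List.pyGetD s.toList i ' ')
      (g := fun acc c => if c != Char.ofNat t.toNat then acc + 1 else acc)]
  rw [PySem.List.foldl_count_if (fun c => c != Char.ofNat t.toNat) _ 0]
  rw [countP_ne_eq]
  have := List.count_le_length (a := Char.ofNat t.toNat) (l := pvWindow s start end_)
  unfold pvWindow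
  push_cast [Nat.cast_sub (List.count_le_length)]
  ring

theorem go_eq_any (s : String) (start end_ k : Int) (ts : List Int) :
    canMakeUniformGo s start end_ k ts =
      ts.any (fun t => decide (canMakeUniformDiff s start end_ t ≤ k)) := by
  induction ts with
  | nil => rfl
  | cons t ts ih =>
    simp only [canMakeUniformGo, List.any_cons]
    split_ifs with h <;> simp [h, ih]

theorem A_iff (s : String) (start end_ k : Int) :
    can_make_uniform s start end_ k = true ↔
      ∃ t : Int, 65 ≤ t ∧ t < 91 ∧
        ((pvWindow s start end_).length : Int) - ((pvWindow s start end_).count (Char.ofNat t.toNat) : Int) ≤ k := by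
  unfold can_make_uniform
  rw [go_eq_any, List.any_eq_true]
  constructor
  · rintro ⟨t, ht, h⟩
    rw [PySem.List.mem_pyRange_one] at ht
    exact ⟨t, ht.1, ht.2, by rw [← diff_eq]; exact of_decide_eq_true h⟩
  · rintro ⟨t, h1, h2, h⟩
    exact ⟨t, PySem.List.mem_pyRange_one.mpr ⟨h1, h2⟩, decide_eq_true (by rw [diff_eq]; exact h)⟩

theorem B_iff (s : String) (start end_ k : Int) :
    can_make_uniform_alt s start end_ k = true ↔
      ((pvWindow s start end_).length : Int) - pvBest (pvWindow s start end_) ≤ k := by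
  unfold can_make_uniform_alt
  have hcounts :
      ((pvWindow s start end_).foldl
        (fun d c => if pvIsUpper c then d.insert c (d.getD c 0 + 1) else d)
        (PySem.Dict.empty : PySem.Dict Char Int)) =
      PySem.Dict.counter ((pvWindow s start end_).filter pvIsUpper) := by
    rw [← PySem.Dict.foldl_insert_getD_add_one_eq_counter, List.foldl_filter]
  have hvals :
      (PySem.Dict.counter ((pvWindow s start end_).filter pvIsUpper)).values =
      (PySem.Set.ofList ((pvWindow s start end_).filter pvIsUpper)).map
        (fun c => (((pvWindow s start end_).filter pvIsUpper).count c : Int)) := by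
    rw [PySem.Dict.values_eq_map_keys _ (PySem.Dict.nodup_keys_counter _) 0,
        PySem.Dict.keys_counter]
    exact List.map_congr_left (fun c _ => PySem.Dict.getD_counter _ c)
  show decide _ = true ↔ _
  rw [decide_eq_true_iff]
  rw [show ((PySem.List.pyRange start (end_ + 1) 1).map (fun i => PySem.List.pyGetD s.toList i ' ')) = pvWindow s start end_ from rfl]
  rw [hcounts, hvals]
  rfl

-- the three facts about B's 'best' that drive the equivalence
theorem pvBest_spec (w : List Char) :
    0 ≤ pvBest w ∧
    (∀ c ∈ w, pvIsUpper c = true → (w.count c : Int) ≤ pvBest w) ∧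
    (pvBest w = 0 ∨ ∃ c ∈ w, pvIsUpper c = true ∧ pvBest w = (w.count c : Int)) := by
  set U := w.filter pvIsUpper with hU
  set vals := (PySem.Set.ofList U).map (fun c => (U.count c : Int)) with hvals
  have hpb : pvBest w = (PySem.List.max? vals (fun v => v)).getD 0 := by
    rw [hvals, hU]; rfl
  have hmem : ∀ c ∈ w, pvIsUpper c = true → (w.count c : Int) ≤ pvBest w := by
    intro c hc hup
    have hcU : c ∈ U := List.mem_filter.mpr ⟨hc, hup⟩
    have hcnt : U.count c = w.count c := List.count_filter hup
    have hin : (U.count c : Int) ∈ vals :=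
      List.mem_map.mpr ⟨c, (PySem.Set.mem_ofList U c).mpr hcU, rfl⟩
    rcases hm : PySem.List.max? vals (fun v => v) with _ | m
    · rw [PySem.List.max?_eq_none_iff] at hm
      rw [hm] at hin; exact absurd hin (List.not_mem_nil)
    · have hle := PySem.List.max?_isMax hm _ hin
      rw [hcnt] at hle
      rw [hpb, hm]
      exact hle
  have hform : pvBest w = 0 ∨ ∃ c ∈ w, pvIsUpper c = true ∧ pvBest w = (w.count c : Int) := by
    rcases hm : PySem.List.max? vals (fun v => v) with _ | m
    · left; rw [hpb, hm]; rfl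
    · right
      have hmv : m ∈ vals := PySem.List.max?_mem hm
      rcases List.mem_map.mp hmv with ⟨c, hcs, hcm⟩
      have hcU : c ∈ U := (PySem.Set.mem_ofList U c).mp hcs
      have hcw : c ∈ w := (List.mem_filter.mp hcU).1
      have hup : pvIsUpper c = true := (List.mem_filter.mp hcU).2
      have hcnt : U.count c = w.count c := List.count_filter hup
      refine ⟨c, hcw, hup, ?_⟩
      rw [hpb, hm, ← hcnt, ← hcm]
      rfl
  refine ⟨?_, hmem, hform⟩
  rcases hform with h | ⟨c, _, _, h⟩
  · omega
  · rw [h]; positivity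

-- ===== VERDICT (by name: the statement is the Claim_ definition above) =====
theorem can_make_uniform_spec : Claim_equal_can_make_uniform := by
  intro s start end_ k _ _
  unfold Spec_can_make_uniform
  rw [Bool.eq_iff_iff, A_iff, B_iff]
  set w := pvWindow s start end_ with hw
  obtain ⟨hpos, hub, hform⟩ := pvBest_spec w
  constructor
  · rintro ⟨t, h1, h2, h⟩
    set c := Char.ofNat t.toNat with hc
    by_cases hcw : c ∈ w
    · have hup : pvIsUpper c = true := by
        rw [pvIsUpper_iff, hc, toNat_ofNat_upper t.toNat (by omega) (by omega)]
        omega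
      have := hub c hcw hup
      omega
    · have hz : w.count c = 0 := List.count_eq_zero.mpr hcw
      rw [hz] at h
      omega
  · intro h
    rcases hform with h0 | ⟨c, hcw, hup, hbc⟩
    · refine ⟨65, by omega, by omega, ?_⟩
      have : (0 : Int) ≤ (w.count (Char.ofNat (65 : Int).toNat) : Int) := by positivity
      omega
    · rw [pvIsUpper_iff] at hup
      refine ⟨(c.toNat : Int), by omega, by omega, ?_⟩
      rw [show ((c.toNat : Int)).toNat = c.toNat from Int.toNat_natCast _, Char.ofNat_toNat]
      omega
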